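-- pv_equiv track=rewrite | github.com/Shiakaron/foo.bar | level3_part3old2.py | get_standard_form
-- ===== SOURCE A (Python) =====
-- def get_standard_form(m, N):
--     m_rowsums = [sum(m[i]) for i in range(N)]
--     stable = []
--     unstable = []
--     count_stable_states = 0
--     for i in range(N):
--         if m_rowsums[i] == 0:
--             stable.append(i)
--             count_stable_states += 1
--         else:
--             unstable.append(i)
--     order = stable + unstable
--     n = []
--     for i in order:
--         add = []
--         for j in order:
--             if i == j and i in stable:
--                 add.append(1)
--             else:
--                 add.append(m[i][j])
--         n.append(add)
--     n_rowsums = [sum(n[i]) for i in range(N)]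
--     p = []
--     for i in range(N):
--         temp = 1
--         for j in range(N):
--             if j!=i:
--                 temp *= n_rowsums[j]
--         copy = n[i][:]
--         for j in range(N):
--             copy[j] *= temp
--         p.append(copy)
--     denom = 1
--     for i in range(N):
--         denom *= n_rowsums[i]
--     return p, count_stable_states, denom
-- ===== SOURCE B (Python) =====
-- def get_standard_form(m, N):
--     stable = [i for i in range(N) if sum(m[i]) == 0]
--     unstable = [i for i in range(N) if sum(m[i]) != 0]
--     order = stable + unstable
--     sset = set(stable)
--     n = [[1 if i == j and i in sset else m[i][j] for j in order] for i in order]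
--     rs = [sum(row) for row in n]
--     # prefix products: pre[k] = product of rs[:k]; acc ends as product of all rs
--     pre = [1]
--     acc = 1
--     for r in rs:
--         acc *= r
--         pre.append(acc)
--     denom = acc
--     # suffix products: suf[k] = product of rs[k:]
--     suf = [1]
--     acc = 1
--     for r in reversed(rs):
--         acc *= r
--         suf.append(acc)
--     suf.reverse()
--     p = [[x * (pre[i] * suf[i + 1]) for x in row] for i, row in enumerate(n)]
--     return p, len(stable), denom
-- ===== Notes on version B (the rewrite author's own statement) =====
-- stated objective: alternative
-- what changed: B computes each row's scaling factor from precomputed prefix/suffix product tables of the row-sums (and builds the stable/unstable partition with filters and a set for membership) instead of A's per-row inner loop multiplying all other row-sums and its append/count accumulator loops.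
import Mathlib
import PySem

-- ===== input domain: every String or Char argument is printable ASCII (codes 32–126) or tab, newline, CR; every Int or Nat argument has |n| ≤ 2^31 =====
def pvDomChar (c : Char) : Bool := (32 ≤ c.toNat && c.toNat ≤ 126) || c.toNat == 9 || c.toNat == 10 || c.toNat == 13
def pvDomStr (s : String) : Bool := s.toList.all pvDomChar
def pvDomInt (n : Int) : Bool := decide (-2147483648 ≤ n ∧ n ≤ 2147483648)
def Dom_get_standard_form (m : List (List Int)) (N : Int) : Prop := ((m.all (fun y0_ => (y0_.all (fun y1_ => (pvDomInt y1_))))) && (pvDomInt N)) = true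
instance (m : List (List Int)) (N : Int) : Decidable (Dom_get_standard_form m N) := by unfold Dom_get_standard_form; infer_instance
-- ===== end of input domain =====

-- B replaces A's per-row inner loop over all other row-sums by prefix/suffix
-- product tables and A's append/count loops by filters and comprehensions:
-- an alternative formulation of the same exact integer result.

-- ===== PORT A =====
def get_standard_form (m : List (List Int)) (N : Int) : List (List Int) × Int × Int :=
  let m_rowsums := (PySem.List.pyRange 0 N).map (fun i => (PySem.List.pyGetD m i []).sum)
  let suc := (PySem.List.pyRange 0 N).foldl
      (fun (acc : List Int × List Int × Int) i =>
        if PySem.List.pyGetD m_rowsums i 0 = 0 then (acc.1 ++ [i], acc.2.1, acc.2.2 + 1)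
        else (acc.1, acc.2.1 ++ [i], acc.2.2))
      ([], [], 0)
  let stable := suc.1
  let unstable := suc.2.1
  let count_stable_states := suc.2.2
  let order := stable ++ unstable
  let n := order.foldl (fun acc i =>
      acc ++ [order.foldl (fun add j =>
        add ++ [if i = j ∧ i ∈ stable then 1
                else PySem.List.pyGetD (PySem.List.pyGetD m i []) j 0]) []]) []
  let n_rowsums := (PySem.List.pyRange 0 N).map (fun i => (PySem.List.pyGetD n i []).sum)
  let p := (PySem.List.pyRange 0 N).foldl (fun acc i =>
      let temp := (PySem.List.pyRange 0 N).foldl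
        (fun t j => if j ≠ i then t * PySem.List.pyGetD n_rowsums j 0 else t) 1
      let copy := PySem.List.pyGetD n i []
      let copy := (PySem.List.pyRange 0 N).foldl
        (fun c j => PySem.List.pySetD c j (PySem.List.pyGetD c j 0 * temp)) copy
      acc ++ [copy]) []
  let denom := (PySem.List.pyRange 0 N).foldl (fun d i => d * PySem.List.pyGetD n_rowsums i 0) 1
  (p, count_stable_states, denom)

-- ===== PORT B =====
def get_standard_form_alt (m : List (List Int)) (N : Int) : List (List Int) × Int × Int :=
  let stable := (PySem.List.pyRange 0 N).filter (fun i => (PySem.List.pyGetD m i []).sum == 0)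
  let unstable := (PySem.List.pyRange 0 N).filter (fun i => (PySem.List.pyGetD m i []).sum != 0)
  let order := stable ++ unstable
  let sset := PySem.Set.ofList stable
  let n := order.map (fun i => order.map (fun j =>
      if i == j && PySem.Set.contains sset i then 1
      else PySem.List.pyGetD (PySem.List.pyGetD m i []) j 0))
  let rs := n.map (fun row => row.sum)
  let pr := rs.foldl (fun (st : List Int × Int) r => (st.1 ++ [st.2 * r], st.2 * r)) ([1], 1)
  let pre := pr.1
  let denom := pr.2
  let sf := rs.reverse.foldl (fun (st : List Int × Int) r => (st.1 ++ [st.2 * r], st.2 * r)) ([1], 1)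
  let suf := sf.1.reverse
  let p := (PySem.List.enumerate n).map (fun ir =>
      ir.2.map (fun x => x * (PySem.List.pyGetD pre ir.1 0 * PySem.List.pyGetD suf (ir.1 + 1) 0)))
  (p, (stable.length : Int), denom)

-- ===== PRECONDITION & SPEC =====
-- Pre_ excludes exactly the inputs where Python A raises IndexError: each of the
-- first N rows must cover the indices actually read from it (N entries, except the
-- last row when its sum is 0: its diagonal access is skipped, so N-1 entries do).
def Pre_get_standard_form (m : List (List Int)) (N : Int) : Prop :=
  N ≤ (m.length : Int) ∧ ∀ k ∈ List.range N.toNat,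
    N ≤ ((m.getD k []).length : Int) ∨
    ((k : Int) = N - 1 ∧ (m.getD k []).sum = 0 ∧ N - 1 ≤ ((m.getD k []).length : Int))
instance (m : List (List Int)) (N : Int) : Decidable (Pre_get_standard_form m N) := by
  unfold Pre_get_standard_form; infer_instance
def pvWitness_get_standard_form : List (List Int) × Int := ([[0, 0], [1, 0]], 2)

def Spec_get_standard_form (m : List (List Int)) (N : Int) (out : List (List Int) × Int × Int) : Prop := out = get_standard_form_alt m N
instance (m : List (List Int)) (N : Int) (out : List (List Int) × Int × Int) : Decidable (Spec_get_standard_form m N out) := by unfold Spec_get_standard_form; infer_instance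

-- ===== CLAIM (what is proved, stated in full; the proofs are below) =====
def Claim_equal_get_standard_form : Prop := ∀ (m : List (List Int)) (N : Int), Dom_get_standard_form m N → Pre_get_standard_form m N → Spec_get_standard_form m N (get_standard_form m N)

-- ===== LEMMAS AND PROOFS =====

def pvIdx (K : Nat) : List Int := List.map (fun (k : Nat) => (k : Int)) (List.range K)
def pvStable (m : List (List Int)) (K : Nat) : List Int :=
  (pvIdx K).filter (fun i => (PySem.List.pyGetD m i []).sum == 0)
def pvOrder (m : List (List Int)) (K : Nat) : List Int :=
  pvStable m K ++ (pvIdx K).filter (fun i => !((PySem.List.pyGetD m i []).sum == 0))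
def pvN (m : List (List Int)) (K : Nat) : List (List Int) :=
  (pvOrder m K).map (fun i => (pvOrder m K).map (fun j =>
    if i = j ∧ i ∈ pvStable m K then 1
    else PySem.List.pyGetD (PySem.List.pyGetD m i []) j 0))
def pvRS (m : List (List Int)) (K : Nat) : List Int := (pvN m K).map List.sum

theorem pv_range_toNat (N : Int) : PySem.List.pyRange 0 N = PySem.List.pyRange 0 (N.toNat : Int) := by
  by_cases h : 0 ≤ N
  · rw [Int.toNat_of_nonneg h]
  · rw [PySem.List.pyRange_one_eq_nil (by omega), PySem.List.pyRange_one_eq_nil (by omega)]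

theorem pv_idx (K : Nat) : PySem.List.pyRange 0 (K : Int) = pvIdx K := by
  rw [PySem.List.pyRange_zero_natCast K, pvIdx]

theorem pv_order_length (m : List (List Int)) (K : Nat) : (pvOrder m K).length = K := by
  rw [pvOrder, pvStable, List.length_append, ← List.length_eq_length_filter_add]
  simp [pvIdx]

theorem pv_n_length (m : List (List Int)) (K : Nat) : (pvN m K).length = K := by
  rw [pvN, List.length_map, pv_order_length]

theorem pv_row_length (m : List (List Int)) (K : Nat) (k : Nat) (hk : k < K) :
    ((pvN m K).getD k []).length = K := by
  rw [pvN]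
  rw [List.getD_eq_getElem?_getD, List.getElem?_map]
  rw [List.getElem?_eq_getElem (by rw [pv_order_length]; exact hk)]
  simp [pv_order_length]

theorem pv_rs_length (m : List (List Int)) (K : Nat) : (pvRS m K).length = K := by
  rw [pvRS, List.length_map, pv_n_length]

-- generic: map over pyRange of pyGetD, with a post-function
theorem pv_map_get (xs : List (List Int)) (K : Nat) (h : xs.length = K) :
    (PySem.List.pyRange 0 (K : Int)).map (fun i => (PySem.List.pyGetD xs i []).sum)
    = xs.map List.sum := by
  have hl : (K : Int) = PySem.List.len xs := by simp [PySem.List.len_eq, h]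
  conv_rhs => rw [← PySem.List.map_pyGetD_pyRange_zero (xs := xs) (d := ([] : List Int))]
  rw [hl, List.map_map]
  simp [Function.comp_def]

theorem pv_ppfold (l : List Int) (L : List Int) (a : Int) :
    l.foldl (fun (st : List Int × Int) r => (st.1 ++ [st.2 * r], st.2 * r)) (L, a)
    = (L ++ (List.range l.length).map (fun k => a * (l.take (k+1)).prod), a * l.prod) := by
  induction l generalizing L a with
  | nil => simp
  | cons x t ih =>
    simp only [List.foldl_cons, ih, List.length_cons, List.range_succ_eq_map]
    simp [List.map_map, Function.comp_def, mul_assoc, List.append_assoc]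

theorem pv_pre_shape (l : List Int) :
    (1 : Int) :: (List.range l.length).map (fun (k : Nat) => (l.take (k+1)).prod)
    = (List.range (l.length + 1)).map (fun (k : Nat) => (l.take k).prod) := by
  rw [List.range_succ_eq_map]
  simp [List.map_map, Function.comp_def]

theorem pv_suf_shape (l : List Int) :
    ((List.range (l.length + 1)).map (fun (k : Nat) => (l.reverse.take k).prod)).reverse
    = (List.range (l.length + 1)).map (fun (j : Nat) => (l.drop j).prod) := by
  apply List.ext_getElem
  · simp
  · intro i h1 h2
    simp only [List.length_reverse, List.length_map, List.length_range] at h1 h2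
    simp only [List.getElem_reverse, List.getElem_map, List.getElem_range, List.length_map,
      List.length_range]
    rw [List.take_reverse, List.prod_reverse]
    congr 2
    omega

theorem pv_map_enumerate (g : Int → List Int → List Int) :
    ∀ (xs : List (List Int)) (s : Int),
    (PySem.List.enumerate xs s).map (fun ir => g ir.1 ir.2)
    = (List.range xs.length).map (fun (k : Nat) => g (s + (k : Int)) (xs.getD k [])) := by
  intro xs
  induction xs with
  | nil => simp [PySem.List.enumerate_nil]
  | cons x t ih =>
    intro s
    rw [PySem.List.enumerate_cons, List.map_cons, ih, List.length_cons, List.range_succ_eq_map]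
    simp only [List.map_cons, List.map_map, Function.comp_def, List.getD_cons_zero, List.getD_cons_succ]
    rw [Nat.cast_zero, add_zero]
    congr 1
    apply List.map_congr_left
    intro k _
    congr 1
    push_cast; ring

theorem pv_B_norm (m : List (List Int)) (N : Int) :
    get_standard_form_alt m N =
      ((List.range N.toNat).map (fun k =>
        ((pvN m N.toNat).getD k []).map (fun x =>
          x * (((pvRS m N.toNat).take k).prod * ((pvRS m N.toNat).drop (k+1)).prod))),
       ((pvStable m N.toNat).length : Int), (pvRS m N.toNat).prod) := by
  set K := N.toNat with hK
  rw [get_standard_form_alt]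
  rw [pv_range_toNat, ← hK, pv_idx]
  -- stable = pvStable
  have hst : (pvIdx K).filter (fun i => (PySem.List.pyGetD m i []).sum == 0) = pvStable m K := rfl
  have hun : (pvIdx K).filter (fun i => (PySem.List.pyGetD m i []).sum != 0)
      = (pvIdx K).filter (fun i => !((PySem.List.pyGetD m i []).sum == 0)) := by
    simp [bne]
  rw [hst, hun]
  have horder : pvStable m K ++ (pvIdx K).filter (fun i => !((PySem.List.pyGetD m i []).sum == 0))
      = pvOrder m K := rfl
  rw [horder]
  -- n = pvN
  have hn : (pvOrder m K).map (fun i => (pvOrder m K).map (fun j =>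
      if i == j && PySem.Set.contains (PySem.Set.ofList (pvStable m K)) i then 1
      else PySem.List.pyGetD (PySem.List.pyGetD m i []) j 0)) = pvN m K := by
    rw [pvN]
    apply List.map_congr_left; intro i _
    apply List.map_congr_left; intro j _
    have hc : (i == j && PySem.Set.contains (PySem.Set.ofList (pvStable m K)) i) = true
        ↔ (i = j ∧ i ∈ pvStable m K) := by
      simp [pysem]
    by_cases h : i = j ∧ i ∈ pvStable m K
    · rw [if_pos (hc.mpr h), if_pos h]
    · rw [if_neg (fun hb => h (hc.mp hb)), if_neg h]
  rw [hn]
  -- rs = pvRS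
  have hrs : (pvN m K).map (fun row => row.sum) = pvRS m K := rfl
  rw [hrs]
  -- prefix fold
  rw [pv_ppfold, pv_ppfold]
  simp only [one_mul]
  rw [pv_rs_length, List.length_reverse, pv_rs_length]
  -- pre and suf shapes
  have hpre : (1 : Int) :: (List.range K).map (fun (k : Nat) => ((pvRS m K).take (k+1)).prod)
      = (List.range (K + 1)).map (fun (k : Nat) => ((pvRS m K).take k).prod) := by
    have := pv_pre_shape (pvRS m K); rwa [pv_rs_length] at this
  have hsuf : ((1 : Int) :: (List.range K).map (fun (k : Nat) => ((pvRS m K).reverse.take (k+1)).prod)).reverse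
      = (List.range (K + 1)).map (fun (j : Nat) => ((pvRS m K).drop j).prod) := by
    have h1 : (1 : Int) :: (List.range K).map (fun (k : Nat) => ((pvRS m K).reverse.take (k+1)).prod)
        = (List.range (K + 1)).map (fun (k : Nat) => ((pvRS m K).reverse.take k).prod) := by
      have := pv_pre_shape (pvRS m K).reverse
      rwa [List.length_reverse, pv_rs_length] at this
    rw [h1]
    have := pv_suf_shape (pvRS m K); rwa [pv_rs_length] at this
  simp only [List.cons_append, List.nil_append] at hpre hsuf ⊢
  rw [hpre, hsuf]
  -- p via enumerate
  rw [pv_map_enumerate (g := fun idx row => row.map (fun x => x *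
        (PySem.List.pyGetD ((List.range (K + 1)).map (fun (k : Nat) => ((pvRS m K).take k).prod)) idx 0 *
         PySem.List.pyGetD ((List.range (K + 1)).map (fun (j : Nat) => ((pvRS m K).drop j).prod)) (idx + 1) 0)))]
  rw [pv_n_length]
  refine Prod.ext ?_ (Prod.ext rfl rfl)
  show _ = (List.range K).map _
  apply List.map_congr_left
  intro k hk
  have hkK : k < K := List.mem_range.mp hk
  simp only [zero_add]
  have hg1 : PySem.List.pyGetD ((List.range (K + 1)).map (fun (k : Nat) => ((pvRS m K).take k).prod)) (k : Int) 0
      = ((pvRS m K).take k).prod := by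
    rw [PySem.List.pyGetD_natCast, PySem.List.getD_map_range _ _ _ _ (by omega)]
  have hg2 : PySem.List.pyGetD ((List.range (K + 1)).map (fun (j : Nat) => ((pvRS m K).drop j).prod)) ((k : Int) + 1) 0
      = ((pvRS m K).drop (k+1)).prod := by
    have : ((k : Int) + 1) = ((k + 1 : Nat) : Int) := by push_cast; ring
    rw [this, PySem.List.pyGetD_natCast, PySem.List.getD_map_range _ _ _ _ (by omega)]
  rw [hg1, hg2]

theorem pv_trifold (P : Int → Prop) [DecidablePred P] (l : List Int) (s u : List Int) (c : Int) :
    l.foldl (fun acc i => if P i then (acc.1 ++ [i], acc.2.1, acc.2.2 + 1)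
                          else (acc.1, acc.2.1 ++ [i], acc.2.2)) (s, u, c)
    = (s ++ l.filter (fun i => decide (P i)), u ++ l.filter (fun i => !decide (P i)),
       c + ((l.filter (fun i => decide (P i))).length : Int)) := by
  induction l generalizing s u c with
  | nil => simp
  | cons x t ih =>
    by_cases h : P x <;> simp [h, ih] <;> push_cast <;> ring

theorem pv_foldl_mul (l : List Int) (f : Int → Int) (a : Int) :
    l.foldl (fun t j => t * f j) a = a * (l.map f).prod := by
  induction l generalizing a with
  | nil => simp
  | cons x t ih => simp [ih, mul_assoc]

theorem pv_setmul_aux (t : Int) (c : List Int) : ∀ (k : Nat), k ≤ c.length →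
    (PySem.List.pyRange 0 (k : Int)).foldl
      (fun c' j => PySem.List.pySetD c' j (PySem.List.pyGetD c' j 0 * t)) c
    = (c.take k).map (fun x => x * t) ++ c.drop k := by
  intro k
  induction k with
  | zero => simp
  | succ k ih =>
    intro hk
    have hkc : k < c.length := by omega
    have h1 : ((k : Int) + 1) = ((k + 1 : Nat) : Int) := by push_cast; ring
    rw [← h1, PySem.List.pyRange_one_succ_right (by positivity), List.foldl_append,
        ih (by omega)]
    simp only [List.foldl_cons, List.foldl_nil]
    have hlen : ((c.take k).map (fun x => x * t)).length = k := by
      simp [List.length_take]; omega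
    have hget : PySem.List.pyGetD ((c.take k).map (fun x => x * t) ++ c.drop k) (k : Int) 0
        = getElem c k hkc := by
      rw [PySem.List.pyGetD_natCast, List.getD_eq_getElem?_getD,
          List.getElem?_append_right (by omega), hlen]
      simp [List.getElem?_drop, List.getElem?_eq_getElem hkc]
    rw [hget, PySem.List.pySetD_natCast, List.set_append, hlen]
    simp only [Nat.sub_self]
    rw [List.drop_eq_getElem_cons hkc]
    simp only [List.set_cons_zero, if_neg (by omega : ¬ (k : Nat) < k)]
    simp only [List.map_take]
    rw [List.take_add_one, List.getElem?_map, List.getElem?_eq_getElem hkc]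
    simp

theorem pv_setmul (t : Int) (c : List Int) (K : Nat) (h : c.length = K) :
    (pvIdx K).foldl
      (fun c' j => PySem.List.pySetD c' j (PySem.List.pyGetD c' j 0 * t)) c
    = c.map (fun x => x * t) := by
  subst h
  rw [← pv_idx, pv_setmul_aux t c c.length (le_refl _)]
  simp

theorem pv_map_idx (f : Int → List Int) (K : Nat) :
    List.map f (pvIdx K) = List.map (fun (k : Nat) => f (k : Int)) (List.range K) := by
  rw [pvIdx, List.map_map]
  rfl

theorem pv_filterA (m : List (List Int)) (K : Nat) (q : Bool → Bool) :
    (PySem.List.pyRange 0 (K : Int)).filter (fun i => q (decide (PySem.List.pyGetD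
        ((PySem.List.pyRange 0 (K : Int)).map (fun i => (PySem.List.pyGetD m i []).sum)) i 0 = 0)))
    = (pvIdx K).filter (fun i => q ((PySem.List.pyGetD m i []).sum == 0)) := by
  rw [List.filter_congr (l := PySem.List.pyRange 0 (K : Int))
      (q := fun i => q ((PySem.List.pyGetD m i []).sum == 0))]
  · rw [pv_idx]
  · intro i hi
    have hb := (PySem.List.mem_pyRange_one).mp hi
    rw [PySem.List.pyGetD_map_pyRange_of_nonneg _ _ _ _ (by omega) (by omega)]
    rfl

theorem pv_temp (rs : List Int) (K k : Nat) (h : rs.length = K) (hk : k < K) :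
    (pvIdx K).foldl
      (fun t j => if j ≠ (k : Int) then t * PySem.List.pyGetD rs j 0 else t) 1
    = (rs.take k).prod * (rs.drop (k+1)).prod := by
  have hstep : (fun (t : Int) (j : Int) => if j ≠ (k : Int) then t * PySem.List.pyGetD rs j 0 else t)
      = fun t j => t * (if j ≠ (k : Int) then PySem.List.pyGetD rs j 0 else 1) := by
    funext t j; split <;> simp
  rw [hstep, pv_foldl_mul, pvIdx, List.map_map]
  have hmap : List.map ((fun j => if j ≠ (k : Int) then PySem.List.pyGetD rs j 0 else 1)
        ∘ (fun (k : Nat) => (k : Int))) (List.range K) = rs.set k 1 := by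
    apply List.ext_getElem
    · simp [h]
    · intro i h1 h2
      simp only [List.getElem_map, List.getElem_range, Function.comp_apply, List.getElem_set]
      by_cases hik : i = k
      · simp [hik]
      · rw [if_pos (by exact_mod_cast hik), if_neg (fun hc => hik hc.symm),
            PySem.List.pyGetD_natCast, List.getD_eq_getElem?_getD,
            List.getElem?_eq_getElem (by simpa [h] using h2)]
        rfl
  rw [hmap, List.prod_set]
  simp [h, hk]

theorem pv_A_norm (m : List (List Int)) (N : Int) :
    get_standard_form m N =
      ((List.range N.toNat).map (fun k =>
        ((pvN m N.toNat).getD k []).map (fun x =>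
          x * (((pvRS m N.toNat).take k).prod * ((pvRS m N.toNat).drop (k+1)).prod))),
       ((pvStable m N.toNat).length : Int), (pvRS m N.toNat).prod) := by
  set K := N.toNat with hK
  rw [get_standard_form]
  rw [pv_range_toNat, ← hK]
  have hstable : (pvIdx K).filter (fun i => ((PySem.List.pyGetD m i []).sum == 0)) = pvStable m K := rfl
  have horder : pvStable m K
        ++ (pvIdx K).filter (fun i => !((PySem.List.pyGetD m i []).sum == 0)) = pvOrder m K := rfl
  have hn : List.map (fun x => List.map (fun x_1 =>
        if x = x_1 ∧ x ∈ pvStable m K then 1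
        else PySem.List.pyGetD (PySem.List.pyGetD m x []) x_1 0) (pvOrder m K)) (pvOrder m K)
      = pvN m K := rfl
  simp only [pv_trifold]
  simp only [pv_filterA m K (q := fun b => b), pv_filterA m K (q := fun b => !b)]
  simp only [List.nil_append, zero_add, hstable]
  simp only [horder]
  simp only [PySem.List.foldl_append_singleton_eq_map, List.nil_append]
  simp only [hn]
  rw [pv_map_get (pvN m K) K (pv_n_length m K)]
  have hrs : (pvN m K).map List.sum = pvRS m K := rfl
  rw [hrs]
  have hdenom : (PySem.List.pyRange 0 (K : Int)).foldl
      (fun d i => d * PySem.List.pyGetD (pvRS m K) i 0) 1 = (pvRS m K).prod := by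
    have hl : (K : Int) = PySem.List.len (pvRS m K) := by
      simp [PySem.List.len_eq, pv_rs_length]
    rw [hl, PySem.List.foldl_pyRange_zero_pyGetD (pvRS m K) 0 (fun d x => d * x) 1,
        ← List.prod_eq_foldl]
  rw [hdenom]
  have hp : (PySem.List.pyRange 0 (K : Int)).map (fun i =>
      (PySem.List.pyRange 0 (K : Int)).foldl (fun c j => PySem.List.pySetD c j (PySem.List.pyGetD c j 0 *
        ((PySem.List.pyRange 0 (K : Int)).foldl
          (fun t j => if j ≠ i then t * PySem.List.pyGetD (pvRS m K) j 0 else t) 1)))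
        (PySem.List.pyGetD (pvN m K) i []))
      = (List.range K).map (fun k => ((pvN m K).getD k []).map (fun x =>
          x * (((pvRS m K).take k).prod * ((pvRS m K).drop (k+1)).prod))) := by
    rw [pv_idx, pv_map_idx]
    apply List.map_congr_left
    intro k hk
    have hkK : k < K := List.mem_range.mp hk
    rw [pv_temp (pvRS m K) K k (pv_rs_length m K) hkK]
    have hcopy : PySem.List.pyGetD (pvN m K) ((k : Nat) : Int) [] = (pvN m K).getD k [] :=
      PySem.List.pyGetD_natCast (pvN m K) k []
    rw [hcopy, pv_setmul _ _ K (pv_row_length m K k hkK)]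
  rw [hp]


-- ===== VERDICT (by name: the statement is the Claim_ definition above) =====
theorem get_standard_form_spec : Claim_equal_get_standard_form := by
  intro m N _ _
  unfold Spec_get_standard_form
  rw [pv_A_norm, pv_B_norm]
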